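-- pv_equiv track=rewrite | github.com/pardon-hnu/IndexFormer | model/database_util.py | split_expressions
-- ===== SOURCE A (Python) =====
-- def split_expressions(expression):
--     parts = []
--     bracket_level = 0
--     current_part = ""
--     for char in expression:
--         if char == '(':
--             current_part += char
--             bracket_level += 1
--             continue
--         elif char == ')':
--             current_part += char
--             bracket_level -= 1
--             continue
--         if char == ',' and bracket_level == 0:
--             parts.append(current_part.strip())
--             current_part = ""
--             continue
--         current_part += char
--     parts.append(current_part.strip())
--     return parts
-- ===== SOURCE B (Python) =====
-- def split_expressions(expression):
--     # Pass 1: record indices of top-level commas.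
--     cuts = []
--     level = 0
--     for i, ch in enumerate(expression):
--         if ch == '(':
--             level += 1
--         elif ch == ')':
--             level -= 1
--         elif ch == ',' and level == 0:
--             cuts.append(i)
--     # Pass 2: slice between consecutive boundaries.
--     parts = []
--     prev = 0
--     for j in cuts:
--         parts.append(expression[prev:j].strip())
--         prev = j + 1
--     parts.append(expression[prev:].strip())
--     return parts
-- ===== Notes on version B (the rewrite author's own statement) =====
-- stated objective: alternative
-- what changed: A accumulates each part character by character into a growing string; B makes one pass that only records the indices of top-level commas and a second pass that slices the original string between consecutive boundaries and strips each slice.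
import Mathlib
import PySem

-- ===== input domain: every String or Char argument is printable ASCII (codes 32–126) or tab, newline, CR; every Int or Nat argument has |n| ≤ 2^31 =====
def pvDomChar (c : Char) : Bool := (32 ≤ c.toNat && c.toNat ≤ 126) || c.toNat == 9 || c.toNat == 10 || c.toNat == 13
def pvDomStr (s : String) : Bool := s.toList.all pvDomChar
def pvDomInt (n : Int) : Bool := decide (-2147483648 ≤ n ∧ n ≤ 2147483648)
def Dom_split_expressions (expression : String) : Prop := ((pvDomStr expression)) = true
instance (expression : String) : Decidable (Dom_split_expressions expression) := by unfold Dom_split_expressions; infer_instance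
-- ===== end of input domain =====

-- B replaces A's char-by-char accumulation with an index-collection pass followed by a slicing pass (objective: alternative decomposition).

-- ===== PORT A =====
-- A's loop state: bracket_level, current_part (as List Char), parts.
def splitLoopA : List Char → Int → List Char → List String → List String
  | [], _, cur, parts => parts ++ [String.ofList (PySem.Chars.strip cur)]
  | c :: cs, lvl, cur, parts =>
    if c = '(' then splitLoopA cs (lvl + 1) (cur ++ [c]) parts
    else if c = ')' then splitLoopA cs (lvl - 1) (cur ++ [c]) parts
    else if c = ',' ∧ lvl = 0 then
      splitLoopA cs lvl [] (parts ++ [String.ofList (PySem.Chars.strip cur)])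
    else splitLoopA cs lvl (cur ++ [c]) parts

def split_expressions (expression : String) : List String :=
  splitLoopA expression.toList 0 [] []

-- ===== PORT B =====
-- Pass 1 of Source B: indices of top-level commas (i is the enumerate counter).
def cutsLoopB : List Char → Int → Nat → List Nat
  | [], _, _ => []
  | c :: cs, lvl, i =>
    if c = '(' then cutsLoopB cs (lvl + 1) (i + 1)
    else if c = ')' then cutsLoopB cs (lvl - 1) (i + 1)
    else if c = ',' ∧ lvl = 0 then i :: cutsLoopB cs lvl (i + 1)
    else cutsLoopB cs lvl (i + 1)

-- Pass 2 of Source B: slice between consecutive boundaries (expression[prev:j] via PySem slice).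
def sliceLoopB : List Nat → List Char → Nat → List String
  | [], full, prev =>
      [String.ofList (PySem.Chars.strip (PySem.List.slice full (some (prev : Int)) none))]
  | j :: rest, full, prev =>
      String.ofList (PySem.Chars.strip (PySem.List.slice full (some (prev : Int)) (some (j : Int))))
        :: sliceLoopB rest full (j + 1)

def split_expressions_alt (expression : String) : List String :=
  sliceLoopB (cutsLoopB expression.toList 0 0) expression.toList 0

-- ===== PRECONDITION & SPEC =====
def Spec_split_expressions (expression : String) (out : List String) : Prop := out = split_expressions_alt expression
instance (expression : String) (out : List String) : Decidable (Spec_split_expressions expression out) := by unfold Spec_split_expressions; infer_instance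

-- ===== CLAIM (what is proved, stated in full; the proofs are below) =====
def Claim_equal_split_expressions : Prop := ∀ (expression : String), Dom_split_expressions expression → Spec_split_expressions expression (split_expressions expression)

-- ===== LEMMAS AND PROOFS =====

-- Common specification: split a char list on top-level commas (no stripping).
def consH (c : Char) : List (List Char) → List (List Char)
  | [] => [[c]]
  | x :: xs => (c :: x) :: xs

def specSplit : List Char → Int → List (List Char)
  | [], _ => [[]]
  | c :: cs, lvl =>
    if c = '(' then consH c (specSplit cs (lvl + 1))
    else if c = ')' then consH c (specSplit cs (lvl - 1))
    else if c = ',' ∧ lvl = 0 then [] :: specSplit cs lvl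
    else consH c (specSplit cs lvl)

def mapHead (f : List Char → List Char) : List (List Char) → List (List Char)
  | [] => []
  | x :: xs => f x :: xs

def stripStr (l : List Char) : String := String.ofList (PySem.Chars.strip l)

lemma consH_ne_nil (c : Char) (l : List (List Char)) : consH c l ≠ [] := by
  cases l <;> simp [consH]

lemma specSplit_ne_nil (cs : List Char) (lvl : Int) : specSplit cs lvl ≠ [] := by
  cases cs with
  | nil => simp [specSplit]
  | cons c cs => unfold specSplit; split_ifs <;> first | exact consH_ne_nil _ _ | simp

lemma mapHead_consH (cur : List Char) (c : Char) (l : List (List Char)) (h : l ≠ []) :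
    mapHead (fun x => cur ++ x) (consH c l) = mapHead (fun x => cur ++ c :: x) l := by
  cases l with
  | nil => exact absurd rfl h
  | cons x xs => simp [mapHead, consH]

lemma splitLoopA_eq (cs : List Char) : ∀ (lvl : Int) (cur : List Char) (parts : List String),
    splitLoopA cs lvl cur parts = parts ++ (mapHead (cur ++ ·) (specSplit cs lvl)).map stripStr := by
  induction cs with
  | nil => intro lvl cur parts; simp [splitLoopA, specSplit, mapHead, stripStr]
  | cons c cs ih =>
    intro lvl cur parts
    by_cases h1 : c = '('
    · simp [splitLoopA, specSplit, h1, ih, mapHead_consH _ _ _ (specSplit_ne_nil _ _)]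
    · by_cases h2 : c = ')'
      · simp [splitLoopA, specSplit, h2, ih, mapHead_consH _ _ _ (specSplit_ne_nil _ _)]
      · by_cases h3 : c = ',' ∧ lvl = 0
        · simp [splitLoopA, specSplit, h3, ih]
          cases h : specSplit cs 0 <;> simp [mapHead, stripStr]
        · simp [splitLoopA, specSplit, h1, h2, h3, ih, mapHead_consH _ _ _ (specSplit_ne_nil _ _)]

lemma mapHead_nil_append (l : List (List Char)) : mapHead (([] : List Char) ++ ·) l = l := by
  cases l <;> simp [mapHead]

-- segsLoop: sliceLoopB without the stripping, on raw drop/take slices.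
def segsLoop : List Nat → List Char → Nat → List (List Char)
  | [], full, prev => [full.drop prev]
  | j :: rest, full, prev => ((full.drop prev).take (j - prev)) :: segsLoop rest full (j + 1)

lemma sliceLoopB_eq_segs (cuts : List Nat) : ∀ (full : List Char) (prev : Nat),
    sliceLoopB cuts full prev = (segsLoop cuts full prev).map stripStr := by
  induction cuts with
  | nil =>
    intro full prev
    simp [sliceLoopB, segsLoop, stripStr, PySem.List.slice_from_natCast]
  | cons j rest ih =>
    intro full prev
    simp [sliceLoopB, segsLoop, stripStr, PySem.List.slice_natCast, ih]

lemma cutsLoopB_ge (cs : List Char) : ∀ (lvl : Int) (i : Nat), ∀ j ∈ cutsLoopB cs lvl i, i ≤ j := by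
  induction cs with
  | nil => intro lvl i j hj; simp [cutsLoopB] at hj
  | cons c cs ih =>
    intro lvl i j hj
    unfold cutsLoopB at hj
    split_ifs at hj with h1 h2 h3
    · exact le_trans (Nat.le_succ i) (ih _ _ _ hj)
    · exact le_trans (Nat.le_succ i) (ih _ _ _ hj)
    · rcases List.mem_cons.mp hj with h | h
      · omega
      · exact le_trans (Nat.le_succ i) (ih _ _ _ h)
    · exact le_trans (Nat.le_succ i) (ih _ _ _ hj)

lemma segsLoop_cons (cuts : List Nat) : ∀ (full : List Char) (i : Nat) (c : Char),
    (∀ j ∈ cuts, i + 1 ≤ j) → full.drop i = c :: full.drop (i + 1) →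
    segsLoop cuts full i = consH c (segsLoop cuts full (i + 1)) := by
  induction cuts with
  | nil => intro full i c _ hdrop; simp [segsLoop, consH, hdrop]
  | cons j rest _ =>
    intro full i c hge hdrop
    have hj : i + 1 ≤ j := hge j (List.mem_cons_self ..)
    have : j - i = (j - (i + 1)) + 1 := by omega
    simp [segsLoop, consH, hdrop, this, List.take_succ_cons]

lemma segsLoop_spec (cs : List Char) : ∀ (lvl : Int) (pre : List Char),
    segsLoop (cutsLoopB cs lvl pre.length) (pre ++ cs) pre.length = specSplit cs lvl := by
  induction cs with
  | nil =>
    intro lvl pre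
    simp [cutsLoopB, segsLoop, specSplit]
  | cons c cs ih =>
    intro lvl pre
    have hdrop : (pre ++ c :: cs).drop pre.length = c :: (pre ++ c :: cs).drop (pre.length + 1) := by
      have h1 : (pre ++ c :: cs).drop pre.length = c :: cs := List.drop_left
      have h2 : (pre ++ c :: cs).drop (pre.length + 1) = cs := by
        have : pre ++ c :: cs = (pre ++ [c]) ++ cs := by simp
        rw [this]
        have : pre.length + 1 = (pre ++ [c]).length := by simp
        rw [this]
        exact List.drop_left
      rw [h1, h2]
    have hfull : pre ++ c :: cs = (pre ++ [c]) ++ cs := by simp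
    have hlen : pre.length + 1 = (pre ++ [c]).length := by simp
    have ihc : ∀ lvl', segsLoop (cutsLoopB cs lvl' (pre.length + 1)) (pre ++ c :: cs) (pre.length + 1) = specSplit cs lvl' := by
      intro lvl'; rw [hfull, hlen]; exact ih lvl' (pre ++ [c])
    by_cases h1 : c = '('
    · rw [show specSplit (c :: cs) lvl = consH c (specSplit cs (lvl + 1)) by simp [specSplit, h1]]
      rw [show cutsLoopB (c :: cs) lvl pre.length = cutsLoopB cs (lvl + 1) (pre.length + 1) by simp [cutsLoopB, h1]]
      rw [segsLoop_cons _ _ _ c (cutsLoopB_ge cs _ _) hdrop, ihc]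
    · by_cases h2 : c = ')'
      · rw [show specSplit (c :: cs) lvl = consH c (specSplit cs (lvl - 1)) by simp [specSplit, h2]]
        rw [show cutsLoopB (c :: cs) lvl pre.length = cutsLoopB cs (lvl - 1) (pre.length + 1) by simp [cutsLoopB, h2]]
        rw [segsLoop_cons _ _ _ c (cutsLoopB_ge cs _ _) hdrop, ihc]
      · by_cases h3 : c = ',' ∧ lvl = 0
        · rw [show specSplit (c :: cs) lvl = [] :: specSplit cs lvl by simp [specSplit, h3]]
          rw [show cutsLoopB (c :: cs) lvl pre.length = pre.length :: cutsLoopB cs lvl (pre.length + 1) by simp [cutsLoopB, h3]]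
          simp [segsLoop, ihc]
        · rw [show specSplit (c :: cs) lvl = consH c (specSplit cs lvl) by simp [specSplit, h1, h2, h3]]
          rw [show cutsLoopB (c :: cs) lvl pre.length = cutsLoopB cs lvl (pre.length + 1) by simp [cutsLoopB, h1, h2, h3]]
          rw [segsLoop_cons _ _ _ c (cutsLoopB_ge cs _ _) hdrop, ihc]

-- ===== VERDICT (by name: the statement is the Claim_ definition above) =====
theorem split_expressions_spec : Claim_equal_split_expressions := by
  intro e _
  unfold Spec_split_expressions split_expressions split_expressions_alt
  rw [splitLoopA_eq, mapHead_nil_append, sliceLoopB_eq_segs]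
  have := segsLoop_spec e.toList 0 []
  simpa [stripStr] using congrArg (List.map stripStr) this.symm
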